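-- pv_equiv track=rewrite | github.com/AliceLovesCode/AdventOfCode2019 | day4.py | meets_criteria_part2
-- ===== SOURCE A (Python) =====
-- def meets_criteria_part2(value):
--     numeral_array = list(str(value))
--     if len(numeral_array) != 6:
--         return False
--
--     repeat_clusters = []
--     current_repeat_cluster = []
--
--     prev_val = 0
--     for string_val in numeral_array:
--         int_val = int(string_val)
--         if int_val < prev_val: return False
--         elif int_val == prev_val:
--             if (len(current_repeat_cluster) > 0):
--                 current_repeat_cluster.append(int_val)
--             else:
--                 current_repeat_cluster.append(int_val)
--                 current_repeat_cluster.append(int_val)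
--         elif (len(current_repeat_cluster) > 0):
--             repeat_clusters.append(current_repeat_cluster.copy())
--             current_repeat_cluster = []
--         prev_val = int_val
--
--     if (len(current_repeat_cluster) > 0):
--         repeat_clusters.append(current_repeat_cluster.copy())
--         current_repeat_cluster = []
--
--     repeat_exists = False
--     for cluster in repeat_clusters:
--         if len(cluster) == 2: repeat_exists = True
--
--     return repeat_exists
-- ===== SOURCE B (Python) =====
-- def meets_criteria_part2(value):
--     s = str(value)
--     if len(s) != 6:
--         return False
--     d = [int(c) for c in s]
--     if any(a > b for a, b in zip(d, d[1:])):
--         return False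
--     return any(d.count(x) == 2 for x in d)
-- ===== Notes on version B (the rewrite author's own statement) =====
-- stated objective: simpler
-- what changed: B replaces A's single-pass repeat-cluster state machine (accumulating cluster lists with a prev/current-cluster accumulator) by two independent declarative passes: a pairwise zip ascending check and a count-based exact-pair test (valid because in a nondecreasing digit list the count of a digit equals its run length).
import Mathlib
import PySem

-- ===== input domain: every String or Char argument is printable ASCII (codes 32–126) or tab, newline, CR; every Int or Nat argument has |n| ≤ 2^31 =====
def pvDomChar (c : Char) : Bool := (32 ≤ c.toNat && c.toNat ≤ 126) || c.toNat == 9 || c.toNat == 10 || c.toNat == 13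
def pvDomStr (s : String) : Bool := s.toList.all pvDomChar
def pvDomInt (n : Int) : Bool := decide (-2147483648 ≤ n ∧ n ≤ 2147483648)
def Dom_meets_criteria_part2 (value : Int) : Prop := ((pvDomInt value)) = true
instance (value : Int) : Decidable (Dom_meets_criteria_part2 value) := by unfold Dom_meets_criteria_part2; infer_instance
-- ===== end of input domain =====

-- B replaces A's repeat-cluster state machine by a pairwise ascending check plus a count-based
-- exact-pair test (simpler decomposition, not faster); return-value equivalence on Pre_.

-- ===== PORT A =====
-- int(string_val) on a single character, as both Pythons apply it inside the loop /
-- comprehension; inside Pre_ every character reaching it is a decimal digit, where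
-- PySem.Int.ofChars? is exact and returns some (the getD 0 default is never used there).
def pvIntChar (c : Char) : Int := (PySem.Int.ofChars? [c]).getD 0

-- final loop of A: repeat_exists over the collected clusters
def pvAFinish (clusters : List (List Int)) : Bool :=
  clusters.foldl (fun r c => if c.length = 2 then true else r) false

-- main for-loop of A, state = (repeat_clusters, current_repeat_cluster, prev_val);
-- returning false models A's early `return False`
def pvALoop : List Char → List (List Int) → List Int → Int → Bool
  | [], clusters, cur, _ =>
      pvAFinish (if cur.length > 0 then clusters ++ [cur] else clusters)
  | c :: rest, clusters, cur, prev =>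
      let v := pvIntChar c
      if v < prev then false
      else if v = prev then
        if cur.length > 0 then pvALoop rest clusters (cur ++ [v]) v
        else pvALoop rest clusters [v, v] v
      else if cur.length > 0 then pvALoop rest (clusters ++ [cur]) [] v
      else pvALoop rest clusters cur v

def meets_criteria_part2 (value : Int) : Bool :=
  let numeral_array := PySem.Int.toChars value   -- list(str(value))
  if numeral_array.length ≠ 6 then false
  else pvALoop numeral_array [] [] 0

-- ===== PORT B =====
def meets_criteria_part2_alt (value : Int) : Bool :=
  let s := PySem.Int.toChars value               -- str(value), as characters
  if s.length ≠ 6 then false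
  else
    let d := s.map pvIntChar                     -- [int(c) for c in s]
    if (d.zip (d.drop 1)).any (fun p => p.1 > p.2) then false   -- zip(d, d[1:]); d[1:] = drop 1
    else d.any (fun x => d.count x = 2)          -- any(d.count(x) == 2 for x in d)

-- ===== PRECONDITION & SPEC =====
-- Pre_ excludes exactly the inputs on which A raises ValueError: negative values whose
-- str() has six characters (i.e. between -99999 and -10000), where int('-') is attempted; B raises there too.
def Pre_meets_criteria_part2 (value : Int) : Prop :=
  0 ≤ value ∨ (PySem.Int.toChars value).length ≠ 6
instance (value : Int) : Decidable (Pre_meets_criteria_part2 value) := by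
  unfold Pre_meets_criteria_part2; infer_instance

def pvWitness_meets_criteria_part2 : Int := (123455)

def Spec_meets_criteria_part2 (value : Int) (out : Bool) : Prop := out = meets_criteria_part2_alt value
instance (value : Int) (out : Bool) : Decidable (Spec_meets_criteria_part2 value out) := by unfold Spec_meets_criteria_part2; infer_instance

-- ===== CLAIM (what is proved, stated in full; the proofs are below) =====
def Claim_equal_meets_criteria_part2 : Prop := ∀ (value : Int), Dom_meets_criteria_part2 value → Pre_meets_criteria_part2 value → Spec_meets_criteria_part2 value (meets_criteria_part2 value)

-- ===== LEMMAS AND PROOFS =====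

-- run-length view of A's loop: run = length of the current run of prev, found = a finished
-- run of exactly 2 seen so far
def pvSpec : List Int → Int → Nat → Bool → Bool
  | [], _, run, found => found || (run == 2)
  | v :: t, prev, run, found =>
      if v < prev then false
      else if v = prev then pvSpec t v (run + 1) found
      else pvSpec t v 1 (found || (run == 2))

theorem pvAFinish_append (clusters : List (List Int)) (c : List Int) :
    pvAFinish (clusters ++ [c]) = if c.length = 2 then true else pvAFinish clusters := by
  simp [pvAFinish]

theorem pvALoop_eq_spec : ∀ (cs : List Char) (clusters : List (List Int)) (cur : List Int)
    (prev : Int) (run : Nat),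
    1 ≤ run → (2 ≤ run → cur = List.replicate run prev) → (run < 2 → cur = []) →
    pvALoop cs clusters cur prev = pvSpec (cs.map pvIntChar) prev run (pvAFinish clusters)
  | [], clusters, cur, prev, run, h1, h2, h3 => by
      simp only [pvALoop, List.map_nil, pvSpec]
      by_cases h : 2 ≤ run
      · rw [h2 h]
        simp only [List.length_replicate]
        have : run > 0 := by omega
        simp only [if_pos this, pvAFinish_append]
        by_cases hr : run = 2 <;> simp [hr]
      · have : run = 1 := by omega
        subst this
        rw [h3 (by omega)]
        simp
  | c :: rest, clusters, cur, prev, run, h1, h2, h3 => by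
      simp only [pvALoop, List.map_cons, pvSpec]
      set v := pvIntChar c with hv
      by_cases hlt : v < prev
      · simp [hlt]
      · simp only [if_neg hlt]
        by_cases heq : v = prev
        · simp only [if_pos heq]
          by_cases h : 2 ≤ run
          · rw [h2 h]
            simp only [List.length_replicate]
            have hpos : run > 0 := by omega
            rw [if_pos hpos, heq]
            have : List.replicate run prev ++ [prev] = List.replicate (run + 1) prev := by
              rw [List.replicate_succ']
            rw [this]
            exact pvALoop_eq_spec rest clusters _ prev (run + 1) (by omega)
              (fun _ => rfl) (fun hh => by omega)
          · have hr1 : run = 1 := by omega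
            rw [h3 (by omega)]
            simp only [List.length_nil, gt_iff_lt, lt_irrefl]
            subst heq
            have : [v, v] = List.replicate 2 v := rfl
            rw [this]
            rw [pvALoop_eq_spec rest clusters _ v 2 (by omega) (fun _ => rfl) (fun hh => by omega)]
            rw [hr1]
            simp
        · simp only [if_neg heq]
          by_cases h : 2 ≤ run
          · rw [h2 h]
            simp only [List.length_replicate]
            have hpos : run > 0 := by omega
            rw [if_pos hpos]
            rw [pvALoop_eq_spec rest (clusters ++ [List.replicate run prev]) [] v 1 (by omega)
              (fun hh => by omega) (fun _ => rfl)]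
            rw [pvAFinish_append]
            simp only [List.length_replicate]
            by_cases hr : run = 2
            · simp [hr]
            · have h2f : (run == 2) = false := by simp [hr]
              simp [hr, h2f]
          · have hr1 : run = 1 := by omega
            rw [h3 (by omega)]
            simp only [List.length_nil, if_neg (by omega : ¬ (0:Nat) > 0)]
            rw [pvALoop_eq_spec rest clusters [] v 1 (by omega) (fun hh => by omega) (fun _ => rfl)]
            rw [hr1]
            simp

-- Boolean nondecreasing-chain predicate (proof-side helper)
def pvChain : Int → List Int → Bool
  | _, [] => true
  | p, v :: t => decide (p ≤ v) && pvChain v t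

theorem pvChain_le : ∀ (v : Int) (t : List Int), pvChain v t = true → ∀ x ∈ t, v ≤ x
  | _, [], _, _, hx => by simp at hx
  | v, w :: t, h, x, hx => by
      rw [pvChain, Bool.and_eq_true, decide_eq_true_iff] at h
      rcases List.mem_cons.mp hx with rfl | hx'
      · exact h.1
      · exact le_trans h.1 (pvChain_le w t h.2 x hx')

theorem pvSpec_char : ∀ (t : List Int) (prev : Int) (run : Nat) (found : Bool), 1 ≤ run →
    pvSpec t prev run found =
      (pvChain prev t &&
        (found || decide (run + t.count prev = 2) || decide (∃ x ∈ t, x ≠ prev ∧ t.count x = 2)))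
  | [], prev, run, found, _ => by
      simp only [pvSpec, pvChain, Bool.true_and, List.count_nil]
      by_cases h : run = 2 <;> simp [h] <;> omega
  | v :: t, prev, run, found, h1 => by
      simp only [pvSpec]
      by_cases hlt : v < prev
      · have : pvChain prev (v :: t) = false := by
          rw [pvChain]; simp; omega
        simp [hlt, this]
      · simp only [if_neg hlt]
        by_cases heq : v = prev
        · subst heq
          rw [pvSpec_char t v (run + 1) found (by omega)]
          have hch : pvChain v (v :: t) = pvChain v t := by
            rw [pvChain]; simp
          have hcount : (v :: t).count v = t.count v + 1 := by
            simp [List.count_cons]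
          have hex : (∃ x ∈ v :: t, x ≠ v ∧ (v :: t).count x = 2) ↔
              (∃ x ∈ t, x ≠ v ∧ t.count x = 2) := by
            constructor
            · rintro ⟨x, hx, hne, hc⟩
              rcases List.mem_cons.mp hx with h | h
              · exact absurd h hne
              · refine ⟨x, h, hne, ?_⟩
                rwa [List.count_cons, if_neg (by simpa using Ne.symm hne), add_zero] at hc
            · rintro ⟨x, hx, hne, hc⟩
              refine ⟨x, List.mem_cons_of_mem _ hx, hne, ?_⟩
              rw [List.count_cons, if_neg (by simpa using Ne.symm hne), add_zero]
              exact hc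
          rw [hcount]
          have harith : (run + 1 + t.count v = 2) ↔ (run + (t.count v + 1) = 2) := by omega
          simp only [hch, decide_eq_decide.mpr hex, decide_eq_decide.mpr harith]
          simp
        · -- v > prev
          have hvp : prev < v := by omega
          rw [pvSpec_char t v 1 (found || (run == 2)) (by omega)]
          by_cases hch : pvChain v t = true
          · have hall : ∀ x ∈ t, v ≤ x := pvChain_le v t hch
            have hchain2 : pvChain prev (v :: t) = true := by
              rw [pvChain, hch]; simp; omega
            have hnp : t.count prev = 0 := by
              rw [List.count_eq_zero]
              intro hmem
              have := hall prev hmem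
              omega
            have hcv : (v :: t).count prev = 0 := by
              rw [List.count_cons, if_neg (by simp; omega), add_zero, hnp]
            have hex : (∃ x ∈ v :: t, x ≠ prev ∧ (v :: t).count x = 2) ↔
                ((1 + t.count v = 2) ∨ ∃ x ∈ t, x ≠ v ∧ t.count x = 2) := by
              constructor
              · rintro ⟨x, hx, hne, hc⟩
                rcases List.mem_cons.mp hx with h | h
                · subst h
                  left
                  rw [List.count_cons, if_pos (by simp), add_comm] at hc
                  omega
                · by_cases hxv : x = v
                  · subst hxv
                    left
                    rw [List.count_cons, if_pos (by simp), add_comm] at hc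
                    omega
                  · right
                    refine ⟨x, h, hxv, ?_⟩
                    rwa [List.count_cons, if_neg (by simpa using Ne.symm hxv), add_zero] at hc
              · rintro (h | ⟨x, hx, hne, hc⟩)
                · refine ⟨v, List.mem_cons_self, by omega, ?_⟩
                  rw [List.count_cons, if_pos (by simp)]
                  omega
                · refine ⟨x, List.mem_cons_of_mem _ hx, ?_, ?_⟩
                  · intro hxp; subst hxp
                    have := hall x hx
                    omega
                  · rw [List.count_cons, if_neg (by simpa using Ne.symm hne), add_zero]
                    exact hc
            simp only [hch, hchain2, Bool.true_and, hcv, hnp,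
              decide_eq_decide.mpr hex]
            by_cases hr : run = 2
            · simp [hr]
              by_cases hf : found = true <;> simp [hf] <;> tauto
            · have : (run == 2) = false := by simp [hr]
              simp only [this, Bool.or_false]
              have : ¬ (run + 0 = 2) := by omega
              simp only [decide_eq_false this, Bool.or_false, Bool.false_or]
              by_cases hf : found = true <;> simp [hf, or_assoc] <;> tauto
          · have hchf : pvChain v t = false := by
              cases hb : pvChain v t
              · rfl
              · exact absurd hb hch
            have : pvChain prev (v :: t) = false := by
              rw [pvChain, hchf]; simp
            simp [hchf, this]
            tauto

-- characterization of str(n) for n ≥ 0 as Nat.toDigits (the core printer)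
def pvDigits (n : Nat) : List Char :=
  if h : n < 10 then [Nat.digitChar n]
  else pvDigits (n / 10) ++ [Nat.digitChar (n % 10)]
  decreasing_by exact Nat.div_lt_self (by omega) (by omega)

theorem pvDigits_ne_nil (n : Nat) : pvDigits n ≠ [] := by
  rw [pvDigits]
  split <;> simp

theorem pvToDigitsCore_eq : ∀ (f n : Nat) (acc : List Char), n < f →
    Nat.toDigitsCore 10 f n acc = pvDigits n ++ acc
  | 0, n, acc, h => by omega
  | f + 1, n, acc, h => by
      rw [Nat.toDigitsCore, pvDigits]
      by_cases h10 : n < 10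
      · have : n / 10 = 0 := Nat.div_eq_of_lt h10
        simp [this, h10, Nat.mod_eq_of_lt h10]
      · have hne : n / 10 ≠ 0 := by
          intro hz
          have := Nat.div_eq_of_lt (show n < 10 by
            have := Nat.lt_of_div_eq_zero (by omega) hz
            omega)
          omega
        have hlt : n / 10 < f := by
          have : n / 10 < n := Nat.div_lt_self (by omega) (by omega)
          omega
        simp only [if_neg hne, dif_neg h10]
        rw [pvToDigitsCore_eq f (n / 10) _ hlt]
        simp

theorem pvToDigits_eq (n : Nat) : Nat.toDigits 10 n = pvDigits n := by
  rw [Nat.toDigits]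
  rw [pvToDigitsCore_eq (n + 1) n [] (by omega)]
  simp

theorem pvDigits_head_pos (n : Nat) (hn : 1 ≤ n) :
    ∀ c rest, pvDigits n = c :: rest → 1 ≤ pvIntChar c := by
  intro c rest heq
  rw [pvDigits] at heq
  by_cases h10 : n < 10
  · rw [dif_pos h10] at heq
    cases heq
    interval_cases n <;> decide
  · rw [dif_neg h10] at heq
    have hne := pvDigits_ne_nil (n / 10)
    obtain ⟨c', rest', hd⟩ := List.exists_cons_of_ne_nil hne
    rw [hd] at heq
    cases heq
    exact pvDigits_head_pos (n / 10) (by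
      have : 10 ≤ n := by omega
      have := Nat.div_le_div_right (c := 10) this
      simpa using this) _ _ hd
  termination_by n
  decreasing_by exact Nat.div_lt_self (by omega) (by omega)

-- the B-side pair check equals Chain (≤)
theorem pvZip_chain : ∀ (a : Int) (t : List Int),
    (((a :: t).zip t).any (fun p => decide (p.1 > p.2))) = !pvChain a t
  | _, [] => by simp [pvChain]
  | a, v :: t => by
      simp only [List.zip_cons_cons, List.any_cons]
      rw [pvZip_chain v t, pvChain]
      by_cases h : a ≤ v
      · have h2 : ¬ (a > v) := by omega
        simp [h, h2]
      · have h2 : a > v := by omega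
        simp [h, h2]

-- the B-side count check equals the run-of-two condition of pvSpec_char
theorem pvCount_any (h : Int) (t : List Int) :
    ((h :: t).any (fun x => decide ((h :: t).count x = 2))) =
      decide ((1 + t.count h = 2) ∨ ∃ x ∈ t, x ≠ h ∧ t.count x = 2) := by
  have hch : (h :: t).count h = t.count h + 1 := by simp [List.count_cons]
  cases hb : ((h :: t).any (fun x => decide ((h :: t).count x = 2))) with
  | false =>
    rw [List.any_eq_false] at hb
    symm
    rw [decide_eq_false_iff_not]
    rintro (hc | ⟨x, hx, hne, hc⟩)
    · have := hb h List.mem_cons_self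
      rw [hch] at this
      simp at this
      omega
    · have := hb x (List.mem_cons_of_mem _ hx)
      rw [List.count_cons, if_neg (by simpa using Ne.symm hne), add_zero] at this
      simp at this
      omega
  | true =>
    rw [List.any_eq_true] at hb
    obtain ⟨x, hx, hc⟩ := hb
    rw [decide_eq_true_eq] at hc
    symm
    rw [decide_eq_true_iff]
    by_cases hxh : x = h
    · subst hxh
      left
      rw [hch] at hc
      omega
    · rcases List.mem_cons.mp hx with hcon | hmem
      · exact absurd hcon hxh
      · right
        refine ⟨x, hmem, hxh, ?_⟩
        rwa [List.count_cons, if_neg (by simpa using Ne.symm hxh), add_zero] at hc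

-- A's loop on a 6-character numeral with positive leading digit equals B's two passes
theorem pvCore (c : Char) (rest : List Char) (hhead : 1 ≤ pvIntChar c) :
    pvALoop (c :: rest) [] [] 0 =
      (if ((pvIntChar c :: rest.map pvIntChar).zip (rest.map pvIntChar)).any
            (fun p => decide (p.1 > p.2)) then false
       else (pvIntChar c :: rest.map pvIntChar).any
            (fun x => decide ((pvIntChar c :: rest.map pvIntChar).count x = 2))) := by
  have hstepA : pvALoop (c :: rest) [] [] 0 = pvALoop rest [] [] (pvIntChar c) := by
    rw [pvALoop]
    rw [if_neg (by omega), if_neg (by omega)]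
    simp
  rw [hstepA,
    pvALoop_eq_spec rest [] [] (pvIntChar c) 1 (by omega) (fun h => by omega) (fun _ => rfl)]
  have hfin : pvAFinish [] = false := rfl
  rw [hfin, pvSpec_char (rest.map pvIntChar) (pvIntChar c) 1 false (by omega)]
  rw [show ((pvIntChar c :: rest.map pvIntChar).zip (rest.map pvIntChar)).any
        (fun p => decide (p.1 > p.2)) = !pvChain (pvIntChar c) (rest.map pvIntChar)
      from pvZip_chain (pvIntChar c) (rest.map pvIntChar)]
  cases hch : pvChain (pvIntChar c) (rest.map pvIntChar)
  · simp [hch]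
  · simp only [Bool.not_true, Bool.false_eq_true, if_false, Bool.true_and, Bool.false_or]
    rw [pvCount_any (pvIntChar c) (rest.map pvIntChar)]
    simp

-- ===== VERDICT (by name: the statement is the Claim_ definition above) =====
theorem meets_criteria_part2_spec : Claim_equal_meets_criteria_part2 := by
  intro value _ hpre
  unfold Spec_meets_criteria_part2
  unfold meets_criteria_part2 meets_criteria_part2_alt
  by_cases hlen : (PySem.Int.toChars value).length ≠ 6
  · rw [if_pos hlen, if_pos hlen]
  · rw [if_neg hlen, if_neg hlen]
    push_neg at hlen
    have hnn : 0 ≤ value := by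
      rcases hpre with h | h
      · exact h
      · omega
    have hL0 : PySem.Int.toChars value = pvDigits value.toNat := by
      rw [PySem.Int.toChars, if_neg (by omega), pvToDigits_eq]
    have hv1 : 1 ≤ value.toNat := by
      by_contra h
      have hz : value.toNat = 0 := by omega
      rw [hL0, hz] at hlen
      simp [pvDigits] at hlen
    obtain ⟨c, rest, hcons⟩ := List.exists_cons_of_ne_nil
      (show PySem.Int.toChars value ≠ [] by intro h; rw [h] at hlen; simp at hlen)
    have hhead : 1 ≤ pvIntChar c :=
      pvDigits_head_pos value.toNat hv1 c rest (by rw [← hL0, hcons])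
    rw [hcons]
    exact pvCore c rest hhead
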